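-- pv_equiv track=rewrite | github.com/PanDAWMS/panda-bigmon-atlas | atlas/prodtask/step_manage_views.py | slices_range_to_str
-- ===== SOURCE A (Python) =====
-- def slices_range_to_str(slices):
--     return_string = hex(slices[0])[2:]
--     last_value = slices[0]
--     is_chain = False
--     for slice in slices[1:]:
--         if (slice-last_value) == 1:
--             is_chain = True
--         else:
--             if is_chain:
--                 return_string += 'x'+hex(last_value)[2:]
--             is_chain = False
--             return_string += 'y'+hex(slice)[2:]
--         last_value = slice
--     if is_chain:
--         return_string += 'x'+hex(last_value)[2:]
--     return_string += 'y'
--     return return_string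
-- ===== SOURCE B (Python) =====
-- def slices_range_to_str(slices):
--     # Pass 1: group into maximal runs of step-1 consecutive values.
--     runs = []
--     start = prev = slices[0]
--     for v in slices[1:]:
--         if v - prev != 1:
--             runs.append((start, prev))
--             start = v
--         prev = v
--     runs.append((start, prev))
--     # Pass 2: format each run, 'y'-terminated.
--     parts = [hex(a)[2:] if a == b else hex(a)[2:] + 'x' + hex(b)[2:] for a, b in runs]
--     return ''.join(p + 'y' for p in parts)
-- ===== Notes on version B (the rewrite author's own statement) =====
-- stated objective: simpler
-- what changed: B replaces A's single stateful scan with an is_chain flag and incremental string appends by a two-pass decomposition: first group the list into maximal (start,end) runs of consecutive values, then format each run and join the 'y'-terminated parts.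
import Mathlib
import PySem

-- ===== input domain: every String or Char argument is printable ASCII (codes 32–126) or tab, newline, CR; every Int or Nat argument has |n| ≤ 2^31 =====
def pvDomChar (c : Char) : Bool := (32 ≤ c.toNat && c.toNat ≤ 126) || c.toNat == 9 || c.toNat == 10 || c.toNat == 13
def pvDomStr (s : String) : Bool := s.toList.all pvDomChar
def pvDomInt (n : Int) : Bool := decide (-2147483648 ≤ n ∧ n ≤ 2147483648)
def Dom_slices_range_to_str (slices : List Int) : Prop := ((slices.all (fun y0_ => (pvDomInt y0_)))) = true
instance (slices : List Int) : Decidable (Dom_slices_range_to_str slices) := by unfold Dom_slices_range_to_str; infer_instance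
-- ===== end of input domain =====

-- B replaces A's single stateful scan (is_chain flag, incremental appends) by a
-- two-pass decomposition: group into maximal consecutive runs, then format and join.

-- ===== PORT A =====
-- hex(n)[2:] for a Python int: lowercase hex digits; for negative n Python's
-- hex(n) = "-0x…", so [2:] drops "-0" and keeps "x…".  Exact on all Int.
def pyHexDrop2 (n : Int) : String :=
  if n < 0 then "x" ++ String.ofList (Nat.toDigits 16 (-n).toNat)
  else String.ofList (Nat.toDigits 16 n.toNat)

-- the for-loop of A over slices[1:], state (return_string, last_value, is_chain)
def aLoop (xs : List Int) (s : String) (last : Int) (chain : Bool) : String :=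
  match xs with
  | [] => (if chain then s ++ "x" ++ pyHexDrop2 last else s) ++ "y"
  | x :: rest =>
      if x - last = 1 then aLoop rest s x true
      else aLoop rest ((if chain then s ++ "x" ++ pyHexDrop2 last else s)
                        ++ ("y" ++ pyHexDrop2 x)) x false

def slices_range_to_str (slices : List Int) : String :=
  match slices with
  | [] => ""   -- unreachable: Pre_ excludes []; Python A raises IndexError here
  | x :: xs => aLoop xs (pyHexDrop2 x) x false

-- ===== PORT B =====
-- pass 1 of Source B: the grouping loop, state (runs-so-far via the recursion, start, prev)
def bRuns (start prev : Int) (xs : List Int) : List (Int × Int) :=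
  match xs with
  | [] => [(start, prev)]
  | v :: rest =>
      if v - prev ≠ 1 then (start, prev) :: bRuns v v rest
      else bRuns start v rest

-- pass 2 of Source B: format one run
def bFmt (r : Int × Int) : String :=
  if r.1 = r.2 then pyHexDrop2 r.1 else pyHexDrop2 r.1 ++ "x" ++ pyHexDrop2 r.2

def slices_range_to_str_alt (slices : List Int) : String :=
  match slices with
  | [] => ""   -- unreachable: Pre_ excludes []; Python B raises IndexError here
  | x :: xs => String.join ((bRuns x x xs).map (fun r => bFmt r ++ "y"))

-- ===== PRECONDITION & SPEC =====
-- Python A (and B) raises IndexError on the empty list (slices[0]).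
def Pre_slices_range_to_str (slices : List Int) : Prop := slices ≠ []
instance (slices : List Int) : Decidable (Pre_slices_range_to_str slices) := by
  unfold Pre_slices_range_to_str; infer_instance
def pvWitness_slices_range_to_str : List Int := ([1, 2, 3, 7])
def Spec_slices_range_to_str (slices : List Int) (out : String) : Prop := out = slices_range_to_str_alt slices
instance (slices : List Int) (out : String) : Decidable (Spec_slices_range_to_str slices out) := by unfold Spec_slices_range_to_str; infer_instance

-- ===== CLAIM (what is proved, stated in full; the proofs are below) =====
def Claim_equal_slices_range_to_str : Prop := ∀ (slices : List Int), Dom_slices_range_to_str slices → Pre_slices_range_to_str slices → Spec_slices_range_to_str slices (slices_range_to_str slices)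

-- ===== LEMMAS AND PROOFS =====

-- fold of ++ over strings, pulled out of the initial accumulator
lemma foldl_append_init (l : List String) (x : String) :
    l.foldl (fun r s => r ++ s) x = x ++ l.foldl (fun r s => r ++ s) "" := by
  induction l generalizing x with
  | nil => simp
  | cons a l ih =>
      simp only [List.foldl_cons]
      rw [ih, ih ("" ++ a)]
      simp [String.append_assoc]

-- render of B's run list
def bRender (rs : List (Int × Int)) : String :=
  String.join (rs.map (fun r => bFmt r ++ "y"))

lemma bRender_cons (r : Int × Int) (rs : List (Int × Int)) :
    bRender (r :: rs) = (bFmt r ++ "y") ++ bRender rs := by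
  simp only [bRender, String.join, List.map_cons, List.foldl_cons]
  rw [foldl_append_init]
  simp [String.append_assoc]

-- A's loop, started on an open run [a..last] whose text so far is p ++ hex a,
-- equals p ++ B's rendering of the runs of the rest; chain ↔ (a ≠ last).
lemma aLoop_eq_bRender (xs : List Int) (p : String) (a last : Int) (chain : Bool)
    (h : chain = true ↔ a ≠ last) (hle : a ≤ last) :
    aLoop xs (p ++ pyHexDrop2 a) last chain = p ++ bRender (bRuns a last xs) := by
  induction xs generalizing p a last chain with
  | nil =>
      rcases chain with _ | _ <;>
        simp_all [aLoop, bRuns, bRender, bFmt, String.join, String.append_assoc]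
  | cons x rest ih =>
      by_cases hd : x - last = 1
      · have e1 : aLoop (x :: rest) (p ++ pyHexDrop2 a) last chain
            = aLoop rest (p ++ pyHexDrop2 a) x true := by
          simp [aLoop, hd]
        have e2 : bRuns a last (x :: rest) = bRuns a x rest := by
          simp [bRuns, hd]
        rw [e1, e2]
        exact ih p a x true (by simp; omega) (by omega)
      · have e1 : aLoop (x :: rest) (p ++ pyHexDrop2 a) last chain
            = aLoop rest ((if chain then p ++ pyHexDrop2 a ++ "x" ++ pyHexDrop2 last
                            else p ++ pyHexDrop2 a) ++ ("y" ++ pyHexDrop2 x)) x false := by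
          simp [aLoop, hd]
        have e2 : bRuns a last (x :: rest) = (a, last) :: bRuns x x rest := by
          simp [bRuns, hd]
        have e3 : (if chain then p ++ pyHexDrop2 a ++ "x" ++ pyHexDrop2 last
                    else p ++ pyHexDrop2 a) ++ ("y" ++ pyHexDrop2 x)
            = (p ++ (bFmt (a, last) ++ "y")) ++ pyHexDrop2 x := by
          rcases chain with _ | _
          · have hal : a = last := by
              by_contra hc; exact absurd (h.mpr hc) (by simp)
            simp [bFmt, hal, String.append_assoc]
          · have hal : a ≠ last := h.mp rfl
            simp [bFmt, hal, String.append_assoc]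
        rw [e1, e3, e2, bRender_cons,
            ih (p ++ (bFmt (a, last) ++ "y")) x x false (by simp) le_rfl]
        simp [String.append_assoc]

-- ===== VERDICT (by name: the statement is the Claim_ definition above) =====
theorem slices_range_to_str_spec : Claim_equal_slices_range_to_str := by
  intro slices _ hpre
  unfold Spec_slices_range_to_str
  match slices with
  | [] => exact absurd rfl hpre
  | x :: xs =>
      show aLoop xs (pyHexDrop2 x) x false = _
      have := aLoop_eq_bRender xs "" x x false (by simp) le_rfl
      simpa [bRender] using this
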